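-- pv_equiv track=rewrite | github.com/iownE9/learn_SICP | BearSir/lab/lab03/lab03/lab03.py | unique_digits
-- ===== SOURCE A (Python) =====
-- def unique_digits(n):
--     """Return the number of unique digits in positive integer n.
--
--     >>> unique_digits(8675309) # All are unique
--     7
--     >>> unique_digits(1313131) # 1 and 3
--     2
--     >>> unique_digits(13173131) # 1, 3, and 7
--     3
--     >>> unique_digits(10000) # 0 and 1
--     2
--     >>> unique_digits(101) # 0 and 1
--     2
--     >>> unique_digits(10) # 0 and 1
--     2
--     """
--     "*** YOUR CODE HERE ***"
--     i, k = 0, 0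
--     while k < 10:
--         if has_digit(n, k):
--             i += 1
--         k += 1
--     return i
--
-- def has_digit(n, k):
--     """Returns whether K is a digit in N.
--     >>> has_digit(10, 1)
--     True
--     >>> has_digit(12, 7)
--     False
--     """
--     "*** YOUR CODE HERE ***"
--     # in a positive integer (1..n) 无需考虑 n = 0
--     # if n == k:
--     #     return True
--     while n > 0:
--         if n % 10 == k:
--             return True
--         n = n // 10
--     return False
-- ===== SOURCE B (Python) =====
-- def unique_digits(n):
--     seen = set()
--     while n > 0:
--         seen.add(n % 10)
--         n //= 10
--     return len(seen)
-- ===== Notes on version B (the rewrite author's own statement) =====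
-- stated objective: simpler
-- what changed: Instead of testing each of the ten digits 0..9 with a has_digit scan of n (ten passes over n's digits), B makes a single pass over n's digits collecting them into a set and returns its size.
import Mathlib
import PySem

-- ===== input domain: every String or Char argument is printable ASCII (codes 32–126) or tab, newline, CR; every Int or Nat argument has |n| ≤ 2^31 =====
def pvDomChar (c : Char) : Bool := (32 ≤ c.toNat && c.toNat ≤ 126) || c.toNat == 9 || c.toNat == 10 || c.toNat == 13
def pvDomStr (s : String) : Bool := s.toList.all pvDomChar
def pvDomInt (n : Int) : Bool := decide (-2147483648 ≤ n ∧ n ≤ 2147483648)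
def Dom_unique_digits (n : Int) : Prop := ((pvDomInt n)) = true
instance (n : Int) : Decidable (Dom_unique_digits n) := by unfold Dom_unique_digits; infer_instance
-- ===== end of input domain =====

-- B replaces A's ten has_digit scans of n by a single pass collecting n's digits into a set (simpler).

-- ===== PORT A =====
def has_digit (n k : Int) : Bool :=
  if _h : 0 < n then
    if PySem.Int.mod n 10 == k then true
    else has_digit (PySem.Int.floordiv n 10) k
  else false
termination_by n.toNat
decreasing_by
  rw [PySem.Int.floordiv_eq_ediv_of_pos (by norm_num)]
  omega

def unique_digits (n : Int) : Int :=
  (PySem.List.pyRange 0 10 1).foldl (fun i k => if has_digit n k then i + 1 else i) 0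

-- ===== PORT B =====
def digitsLoop (n : Int) (seen : PySem.Set Int) : PySem.Set Int :=
  if _h : 0 < n then
    digitsLoop (PySem.Int.floordiv n 10) (PySem.Set.add seen (PySem.Int.mod n 10))
  else seen
termination_by n.toNat
decreasing_by
  rw [PySem.Int.floordiv_eq_ediv_of_pos (by norm_num)]
  omega

def unique_digits_alt (n : Int) : Int :=
  PySem.Set.len (digitsLoop n PySem.Set.empty)

-- ===== PRECONDITION & SPEC =====
def Spec_unique_digits (n : Int) (out : Int) : Prop := out = unique_digits_alt n
instance (n : Int) (out : Int) : Decidable (Spec_unique_digits n out) := by unfold Spec_unique_digits; infer_instance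

-- ===== CLAIM (what is proved, stated in full; the proofs are below) =====
def Claim_equal_unique_digits : Prop := ∀ (n : Int), Dom_unique_digits n → Spec_unique_digits n (unique_digits n)

-- ===== LEMMAS AND PROOFS =====

-- membership in the collected set: k is in it iff A's has_digit finds it or it was already seen
theorem mem_digitsLoop (n : Int) (seen : PySem.Set Int) (k : Int) :
    k ∈ digitsLoop n seen ↔ has_digit n k = true ∨ k ∈ seen := by
  fun_induction digitsLoop n seen with
  | case1 n seen h ih =>
    rw [has_digit]
    simp only [h, dif_pos, ih, PySem.Set.mem_add]
    by_cases hk : PySem.Int.mod n 10 = k <;> simp <;> tauto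
  | case2 n seen h =>
    rw [has_digit]
    simp [h]

theorem nodup_digitsLoop (n : Int) (seen : PySem.Set Int) (h : seen.Nodup) :
    (digitsLoop n seen).Nodup := by
  fun_induction digitsLoop n seen with
  | case1 n seen hn ih => exact ih (PySem.Set.nodup_add _ _ h)
  | case2 n seen hn => exact h

theorem digitsLoop_bounds (n : Int) (seen : PySem.Set Int)
    (h : ∀ x ∈ seen, 0 ≤ x ∧ x < 10) :
    ∀ x ∈ digitsLoop n seen, 0 ≤ x ∧ x < 10 := by
  fun_induction digitsLoop n seen with
  | case1 n seen hn ih =>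
    refine ih ?_
    intro x hx
    rcases (PySem.Set.mem_add _ _ _).mp hx with hx | rfl
    · exact h x hx
    · exact ⟨PySem.Int.mod_nonneg n (by norm_num), PySem.Int.mod_lt n (by norm_num)⟩
  | case2 n seen hn => exact h

-- counting members of a nodup list l over a nodup superlist r gives l.length
theorem countP_mem_of_nodup {α : Type} [DecidableEq α] (l r : List α)
    (hl : l.Nodup) (hr : r.Nodup) (hsub : ∀ x ∈ l, x ∈ r) :
    r.countP (fun x => decide (x ∈ l)) = l.length := by
  rw [List.countP_eq_length_filter]
  have hperm : (r.filter (fun x => decide (x ∈ l))).Perm l := by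
    apply List.perm_of_nodup_nodup_toFinset_eq (hr.filter _) hl
    ext a
    simp only [List.mem_toFinset, List.mem_filter, decide_eq_true_eq]
    exact ⟨fun ⟨_, h⟩ => h, fun h => ⟨hsub a h, h⟩⟩
  exact hperm.length_eq

theorem unique_digits_eq (n : Int) : unique_digits n = unique_digits_alt n := by
  unfold unique_digits unique_digits_alt
  set S := digitsLoop n PySem.Set.empty with hS
  have hmem : ∀ k, has_digit n k = true ↔ k ∈ S := by
    intro k
    rw [hS, mem_digitsLoop]
    simp [PySem.Set.empty]
  have hfold : (PySem.List.pyRange 0 10 1).foldl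
      (fun i k => if has_digit n k then i + 1 else i) 0
      = ((PySem.List.pyRange 0 10 1).countP (fun k => decide (k ∈ S)) : Int) := by
    rw [PySem.List.foldl_count_if]
    simp only [zero_add]
    congr 1
    apply List.countP_congr
    intro k _
    simp [hmem k]
  rw [hfold]
  have hlen : (PySem.List.pyRange 0 10 1).countP (fun k => decide (k ∈ S)) = S.length := by
    apply countP_mem_of_nodup S (PySem.List.pyRange 0 10 1)
      (nodup_digitsLoop n _ List.nodup_nil)
      (PySem.List.nodup_pyRange_one 0 10)
    intro x hx
    rw [PySem.List.mem_pyRange_one]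
    exact digitsLoop_bounds n PySem.Set.empty (by simp [PySem.Set.empty]) x hx
  rw [hlen]
  simp [PySem.Set.len]

-- ===== VERDICT (by name: the statement is the Claim_ definition above) =====
theorem unique_digits_spec : Claim_equal_unique_digits := by
  intro n _
  unfold Spec_unique_digits
  exact unique_digits_eq n
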